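-- pv_equiv track=rewrite | github.com/Abazg17/OptaAnalogModel | Новая папка/models/result/simulate.py | calculate_head_to_head_stats
-- ===== SOURCE A (Python) =====
-- def calculate_head_to_head_stats(results_matrix, teams, tied_teams):
--     """
--     Рассчитывает статистику личных встреч между командами из списка tied_teams:
--     - Очки, набранные в матчах друг с другом.
--     - Количество побед в личных встречах.
--     """
--     num_teams = len(teams)
--
--     # Статистика для личных встреч
--     head_to_head_points = {team: 0 for team in tied_teams}
--     wins = {team: 0 for team in teams}
--
--     for i in range(num_teams):
--         for j in range(num_teams):
--             if i == j:
--                 continue  # Пропускаем матчи против самих себя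
--
--             home_team = teams[i]
--             away_team = teams[j]
--             home_goals, away_goals = int(results_matrix[i][j][0]), int(results_matrix[i][j][-1])
--             if home_goals > away_goals:
--                 wins[home_team] += 1
--             elif home_goals < away_goals:
--                 wins[away_team] += 1
--
--             # Если обе команды в списке tied_teams, учитываем личные встречи
--             if home_team in tied_teams and away_team in tied_teams:
--                 # Очки в личных встречах
--                 if home_goals > away_goals:
--                     head_to_head_points[home_team] += 3
--                 elif home_goals < away_goals:
--                     head_to_head_points[away_team] += 3
--                 else:
--                     head_to_head_points[home_team] += 1
--                     head_to_head_points[away_team] += 1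
--
--     return head_to_head_points, wins
-- ===== SOURCE B (Python) =====
-- def calculate_head_to_head_stats(results_matrix, teams, tied_teams):
--     n = len(teams)
--     # positions of the tied teams; the head-to-head pass visits only these
--     tied_idx = [i for i in range(n) if teams[i] in tied_teams]
--     head_to_head_points = {team: 0 for team in tied_teams}
--     wins = {team: 0 for team in teams}
--     # pass 1: wins over the whole grid
--     for i in range(n):
--         for j in range(n):
--             if i == j:
--                 continue
--             hg, ag = int(results_matrix[i][j][0]), int(results_matrix[i][j][-1])
--             if hg > ag:
--                 wins[teams[i]] += 1
--             elif hg < ag: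
--                 wins[teams[j]] += 1
--     # pass 2: head-to-head points, only over tied positions
--     for i in tied_idx:
--         for j in tied_idx:
--             if i == j:
--                 continue
--             hg, ag = int(results_matrix[i][j][0]), int(results_matrix[i][j][-1])
--             if hg > ag:
--                 head_to_head_points[teams[i]] += 3
--             elif hg < ag:
--                 head_to_head_points[teams[j]] += 3
--             else:
--                 head_to_head_points[teams[i]] += 1
--                 head_to_head_points[teams[j]] += 1
--     return head_to_head_points, wins
-- ===== Notes on version B (the rewrite author's own statement) =====
-- stated objective: alternative
-- what changed: A's single fused double loop is split into two specialized passes: one full-grid pass accumulating wins only, and a second pass that iterates only over the precomputed tied-team positions (tied_idx x tied_idx) to accumulate head-to-head points, instead of re-guarding every grid cell with a membership test.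
import Mathlib
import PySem

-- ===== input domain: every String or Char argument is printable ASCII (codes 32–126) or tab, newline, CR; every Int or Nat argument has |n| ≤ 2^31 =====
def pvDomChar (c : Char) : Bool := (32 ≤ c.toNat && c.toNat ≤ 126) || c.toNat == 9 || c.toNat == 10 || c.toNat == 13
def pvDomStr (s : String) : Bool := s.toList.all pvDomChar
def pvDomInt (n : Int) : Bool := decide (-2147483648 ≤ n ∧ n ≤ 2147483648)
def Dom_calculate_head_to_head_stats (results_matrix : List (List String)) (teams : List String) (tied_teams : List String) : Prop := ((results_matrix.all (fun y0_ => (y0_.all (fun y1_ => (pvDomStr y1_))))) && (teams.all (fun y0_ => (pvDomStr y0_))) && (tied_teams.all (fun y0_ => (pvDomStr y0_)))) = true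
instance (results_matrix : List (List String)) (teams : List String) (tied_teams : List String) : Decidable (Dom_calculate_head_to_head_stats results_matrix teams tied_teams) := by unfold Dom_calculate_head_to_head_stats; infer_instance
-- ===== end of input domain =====

-- B replaces A's single fused double loop by two specialized passes (wins over the full grid,
-- head-to-head only over the precomputed tied positions); objective: alternative decomposition.

-- ===== PORT A =====
-- Literal port of A: one fused loop over all (i, j) carrying both dicts.  Python indexing and
-- int() are ported with PySem primitives; the .getD defaults stand for the places where the
-- Python raises (IndexError / ValueError), which Pre_ excludes.
def calculate_head_to_head_stats (results_matrix : List (List String)) (teams : List String) (tied_teams : List String) : (List (String × Int)) × (List (String × Int)) :=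
  let num_teams : Int := (teams.length : Int)
  let h0 : PySem.Dict String Int := tied_teams.foldl (fun d t => d.insert t 0) PySem.Dict.empty
  let w0 : PySem.Dict String Int := teams.foldl (fun d t => d.insert t 0) PySem.Dict.empty
  let res :=
    (PySem.List.pyRange 0 num_teams 1).foldl (fun st i =>
      (PySem.List.pyRange 0 num_teams 1).foldl (fun st j =>
        if i == j then st else
        let home := (PySem.List.pyGet? teams i).getD ""
        let away := (PySem.List.pyGet? teams j).getD ""
        let cell := ((PySem.List.pyGet? ((PySem.List.pyGet? results_matrix i).getD []) j).getD "").toList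
        let hg := (PySem.Int.ofChars? [(PySem.List.pyGet? cell 0).getD ' ']).getD 0
        let ag := (PySem.Int.ofChars? [(PySem.List.pyGet? cell (-1)).getD ' ']).getD 0
        let st1 :=
          if hg > ag then (st.1, st.2.insert home (st.2.getD home 0 + 1))
          else if hg < ag then (st.1, st.2.insert away (st.2.getD away 0 + 1))
          else st
        if tied_teams.contains home && tied_teams.contains away then
          (if hg > ag then (st1.1.insert home (st1.1.getD home 0 + 3), st1.2)
           else if hg < ag then (st1.1.insert away (st1.1.getD away 0 + 3), st1.2)
           else
             let h' := st1.1.insert home (st1.1.getD home 0 + 1)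
             (h'.insert away (h'.getD away 0 + 1), st1.2))
        else st1) st) (h0, w0)
  (res.1.items, res.2.items)

-- ===== PORT B =====
-- Literal port of B (Source B): tied positions first, then a wins-only pass over the full grid,
-- then a head-to-head pass over tied_idx × tied_idx only.
def calculate_head_to_head_stats_alt (results_matrix : List (List String)) (teams : List String) (tied_teams : List String) : (List (String × Int)) × (List (String × Int)) :=
  let num_teams : Int := (teams.length : Int)
  let tied_idx : List Int := (PySem.List.pyRange 0 num_teams 1).filter
      (fun i => tied_teams.contains ((PySem.List.pyGet? teams i).getD ""))
  let h0 : PySem.Dict String Int := tied_teams.foldl (fun d t => d.insert t 0) PySem.Dict.empty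
  let w0 : PySem.Dict String Int := teams.foldl (fun d t => d.insert t 0) PySem.Dict.empty
  let wins :=
    (PySem.List.pyRange 0 num_teams 1).foldl (fun w i =>
      (PySem.List.pyRange 0 num_teams 1).foldl (fun w j =>
        if i == j then w else
        let cell := ((PySem.List.pyGet? ((PySem.List.pyGet? results_matrix i).getD []) j).getD "").toList
        let hg := (PySem.Int.ofChars? [(PySem.List.pyGet? cell 0).getD ' ']).getD 0
        let ag := (PySem.Int.ofChars? [(PySem.List.pyGet? cell (-1)).getD ' ']).getD 0
        if hg > ag then
          w.insert ((PySem.List.pyGet? teams i).getD "") (w.getD ((PySem.List.pyGet? teams i).getD "") 0 + 1)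
        else if hg < ag then
          w.insert ((PySem.List.pyGet? teams j).getD "") (w.getD ((PySem.List.pyGet? teams j).getD "") 0 + 1)
        else w) w) w0
  let h2h :=
    tied_idx.foldl (fun h i =>
      tied_idx.foldl (fun h j =>
        if i == j then h else
        let cell := ((PySem.List.pyGet? ((PySem.List.pyGet? results_matrix i).getD []) j).getD "").toList
        let hg := (PySem.Int.ofChars? [(PySem.List.pyGet? cell 0).getD ' ']).getD 0
        let ag := (PySem.Int.ofChars? [(PySem.List.pyGet? cell (-1)).getD ' ']).getD 0
        if hg > ag then
          h.insert ((PySem.List.pyGet? teams i).getD "") (h.getD ((PySem.List.pyGet? teams i).getD "") 0 + 3)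
        else if hg < ag then
          h.insert ((PySem.List.pyGet? teams j).getD "") (h.getD ((PySem.List.pyGet? teams j).getD "") 0 + 3)
        else
          let h' := h.insert ((PySem.List.pyGet? teams i).getD "") (h.getD ((PySem.List.pyGet? teams i).getD "") 0 + 1)
          h'.insert ((PySem.List.pyGet? teams j).getD "") (h'.getD ((PySem.List.pyGet? teams j).getD "") 0 + 1)) h) h0
  (h2h.items, wins.items)

-- ===== PRECONDITION & SPEC =====
-- Pre_ excludes exactly the inputs where the Python A raises: some off-diagonal cell (i, j)
-- with i, j < len(teams) is missing (IndexError) or its first/last character is not an int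
-- literal (ValueError / IndexError on the empty string).
def Pre_calculate_head_to_head_stats (results_matrix : List (List String)) (teams : List String) (tied_teams : List String) : Prop :=
  ∀ i < teams.length, ∀ j < teams.length, i ≠ j →
    i < results_matrix.length ∧ j < (results_matrix.getD i []).length ∧
    (((results_matrix.getD i []).getD j "").toList ≠ [] ∧
     (PySem.Int.ofChars? [(((results_matrix.getD i []).getD j "").toList).headD ' ']).isSome ∧
     (PySem.Int.ofChars? [(((results_matrix.getD i []).getD j "").toList).getLastD ' ']).isSome)
instance (results_matrix : List (List String)) (teams : List String) (tied_teams : List String) : Decidable (Pre_calculate_head_to_head_stats results_matrix teams tied_teams) := by unfold Pre_calculate_head_to_head_stats; infer_instance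

def pvWitness_calculate_head_to_head_stats : List (List String) × List String × List String :=
  ([["", "1-0"], ["2-2", ""]], ["a", "b"], ["b", "a"])

def Spec_calculate_head_to_head_stats (results_matrix : List (List String)) (teams : List String) (tied_teams : List String) (out : (List (String × Int)) × (List (String × Int))) : Prop := out = calculate_head_to_head_stats_alt results_matrix teams tied_teams
instance (results_matrix : List (List String)) (teams : List String) (tied_teams : List String) (out : (List (String × Int)) × (List (String × Int))) : Decidable (Spec_calculate_head_to_head_stats results_matrix teams tied_teams out) := by unfold Spec_calculate_head_to_head_stats; infer_instance

-- ===== CLAIM (what is proved, stated in full; the proofs are below) =====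
def Claim_equal_calculate_head_to_head_stats : Prop := ∀ (results_matrix : List (List String)) (teams : List String) (tied_teams : List String), Dom_calculate_head_to_head_stats results_matrix teams tied_teams → Pre_calculate_head_to_head_stats results_matrix teams tied_teams → Spec_calculate_head_to_head_stats results_matrix teams tied_teams (calculate_head_to_head_stats results_matrix teams tied_teams)

-- ===== LEMMAS AND PROOFS =====

-- a fold on a pair state whose step acts componentwise splits into two folds
theorem pv_foldl_pair_split {α σ τ : Type} (f : σ × τ → α → σ × τ) (g : σ → α → σ) (k : τ → α → τ)
    (hf : ∀ s t x, f (s, t) x = (g s x, k t x)) :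
    ∀ (l : List α) (s : σ) (t : τ), l.foldl f (s, t) = (l.foldl g s, l.foldl k t) := by
  intro l
  induction l with
  | nil => intro s t; rfl
  | cons x xs ih => intro s t; simp [List.foldl_cons, hf, ih]

-- a fold whose step is the identity off p restricts to the filtered list
theorem pv_foldl_filter {α σ : Type} (f : σ → α → σ) (p : α → Bool)
    (hf : ∀ s x, p x = false → f s x = s) :
    ∀ (l : List α) (s : σ), l.foldl f s = (l.filter p).foldl f s := by
  intro l
  induction l with
  | nil => intro s; rfl
  | cons x xs ih =>
    intro s
    cases hp : p x with
    | false => simp [List.foldl_cons, hp, hf s x hp, ih]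
    | true => simp [List.foldl_cons, hp, ih]

-- folds of pointwise-equal steps (on members) agree
theorem pv_foldl_congr {α σ : Type} (f g : σ → α → σ) :
    ∀ (l : List α), (∀ s x, x ∈ l → f s x = g s x) → ∀ s, l.foldl f s = l.foldl g s := by
  intro l
  induction l with
  | nil => intro _ s; rfl
  | cons x xs ih =>
    intro h s
    simp only [List.foldl_cons]
    rw [h s x (by simp)]
    exact ih (fun s y hy => h s y (by simp [hy])) _

-- a fold whose every step (on members) is the identity is the identity
theorem pv_foldl_id {α σ : Type} (f : σ → α → σ) :
    ∀ (l : List α), (∀ s x, x ∈ l → f s x = s) → ∀ s, l.foldl f s = s := by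
  intro l
  induction l with
  | nil => intro _ s; rfl
  | cons x xs ih =>
    intro h s
    simp only [List.foldl_cons]
    rw [h s x (by simp)]
    exact ih (fun s y hy => h s y (by simp [hy])) _


-- proof-side abbreviations for the split steps (used only by the lemmas below)
def pvR (teams : List String) : List Int := PySem.List.pyRange 0 (teams.length : Int) 1
def pvH0 (tied_teams : List String) : PySem.Dict String Int := tied_teams.foldl (fun d t => d.insert t 0) PySem.Dict.empty
def pvW0 (teams : List String) : PySem.Dict String Int := teams.foldl (fun d t => d.insert t 0) PySem.Dict.empty
def pvHome (teams : List String) (i : Int) : String := (PySem.List.pyGet? teams i).getD ""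
def pvHG (results_matrix : List (List String)) (i j : Int) : Int :=
  (PySem.Int.ofChars? [(PySem.List.pyGet? (((PySem.List.pyGet? ((PySem.List.pyGet? results_matrix i).getD []) j).getD "").toList) 0).getD ' ']).getD 0
def pvAG (results_matrix : List (List String)) (i j : Int) : Int :=
  (PySem.Int.ofChars? [(PySem.List.pyGet? (((PySem.List.pyGet? ((PySem.List.pyGet? results_matrix i).getD []) j).getD "").toList) (-1)).getD ' ']).getD 0
def pvP (teams tied_teams : List String) (i : Int) : Bool := tied_teams.contains (pvHome teams i)
def pvT (teams tied_teams : List String) : List Int := (pvR teams).filter (pvP teams tied_teams)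

def pvStepHA (results_matrix : List (List String)) (teams tied_teams : List String) (i : Int) (h : PySem.Dict String Int) (j : Int) : PySem.Dict String Int :=
  if i == j then h else
  if tied_teams.contains (pvHome teams i) && tied_teams.contains (pvHome teams j) then
    (if pvHG results_matrix i j > pvAG results_matrix i j then
       h.insert (pvHome teams i) (h.getD (pvHome teams i) 0 + 3)
     else if pvHG results_matrix i j < pvAG results_matrix i j then
       h.insert (pvHome teams j) (h.getD (pvHome teams j) 0 + 3)
     else
       let h' := h.insert (pvHome teams i) (h.getD (pvHome teams i) 0 + 1)
       h'.insert (pvHome teams j) (h'.getD (pvHome teams j) 0 + 1))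
  else h

def pvStepHB (results_matrix : List (List String)) (teams : List String) (i : Int) (h : PySem.Dict String Int) (j : Int) : PySem.Dict String Int :=
  if i == j then h else
  if pvHG results_matrix i j > pvAG results_matrix i j then
    h.insert (pvHome teams i) (h.getD (pvHome teams i) 0 + 3)
  else if pvHG results_matrix i j < pvAG results_matrix i j then
    h.insert (pvHome teams j) (h.getD (pvHome teams j) 0 + 3)
  else
    let h' := h.insert (pvHome teams i) (h.getD (pvHome teams i) 0 + 1)
    h'.insert (pvHome teams j) (h'.getD (pvHome teams j) 0 + 1)

def pvStepW (results_matrix : List (List String)) (teams : List String) (i : Int) (w : PySem.Dict String Int) (j : Int) : PySem.Dict String Int :=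
  if i == j then w else
  if pvHG results_matrix i j > pvAG results_matrix i j then
    w.insert (pvHome teams i) (w.getD (pvHome teams i) 0 + 1)
  else if pvHG results_matrix i j < pvAG results_matrix i j then
    w.insert (pvHome teams j) (w.getD (pvHome teams j) 0 + 1)
  else w

-- A's fused fold splits into an h-component and a w-component
theorem pvA_eq (results_matrix : List (List String)) (teams tied_teams : List String) :
    calculate_head_to_head_stats results_matrix teams tied_teams
      = (((pvR teams).foldl (fun h i => (pvR teams).foldl (pvStepHA results_matrix teams tied_teams i) h) (pvH0 tied_teams)).items,
         ((pvR teams).foldl (fun w i => (pvR teams).foldl (pvStepW results_matrix teams i) w) (pvW0 teams)).items) := by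
  unfold calculate_head_to_head_stats
  refine congrArg (fun p : PySem.Dict String Int × PySem.Dict String Int => (p.1.items, p.2.items))
    (pv_foldl_pair_split _ _ _ ?_ _ _ _)
  intro s t i
  refine pv_foldl_pair_split _ _ _ ?_ _ _ _
  intro s t j
  dsimp only [pvStepHA, pvStepW, pvHome, pvHG, pvAG]
  split_ifs <;> rfl

-- B is literally the pvStep folds
theorem pvB_eq (results_matrix : List (List String)) (teams tied_teams : List String) :
    calculate_head_to_head_stats_alt results_matrix teams tied_teams
      = (((pvT teams tied_teams).foldl (fun h i => (pvT teams tied_teams).foldl (pvStepHB results_matrix teams i) h) (pvH0 tied_teams)).items,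
         ((pvR teams).foldl (fun w i => (pvR teams).foldl (pvStepW results_matrix teams i) w) (pvW0 teams)).items) := by
  rfl

-- the guarded head-to-head fold over the whole grid equals the unguarded fold over tied positions
theorem pvH_chain (results_matrix : List (List String)) (teams tied_teams : List String) (h0 : PySem.Dict String Int) :
    (pvR teams).foldl (fun h i => (pvR teams).foldl (pvStepHA results_matrix teams tied_teams i) h) h0
      = (pvT teams tied_teams).foldl (fun h i => (pvT teams tied_teams).foldl (pvStepHB results_matrix teams i) h) h0 := by
  have hidA : ∀ (s : PySem.Dict String Int) (i j : Int),
      (pvP teams tied_teams i = false ∨ pvP teams tied_teams j = false) →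
      pvStepHA results_matrix teams tied_teams i s j = s := by
    intro s i j hp
    dsimp only [pvStepHA]
    rcases hp with hp | hp
    · have hp' : pvHome teams i ∉ tied_teams := by simpa [pvP] using hp
      simp [hp']
    · have hp' : pvHome teams j ∉ tied_teams := by simpa [pvP] using hp
      simp [hp']
  have houter : ∀ (h : PySem.Dict String Int) (i : Int), pvP teams tied_teams i = false →
      List.foldl (pvStepHA results_matrix teams tied_teams i) h (pvR teams) = h := by
    intro h i hp
    exact pv_foldl_id _ _ (fun s j _ => hidA s i j (Or.inl hp)) h
  rw [pv_foldl_filter (fun h i => (pvR teams).foldl (pvStepHA results_matrix teams tied_teams i) h)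
      (pvP teams tied_teams) houter]
  apply pv_foldl_congr
  intro s i hi
  have hpi : pvP teams tied_teams i = true := List.of_mem_filter hi
  have hinner : ∀ (s' : PySem.Dict String Int) (j : Int), pvP teams tied_teams j = false →
      pvStepHA results_matrix teams tied_teams i s' j = s' :=
    fun s' j hp => hidA s' i j (Or.inr hp)
  rw [pv_foldl_filter (pvStepHA results_matrix teams tied_teams i) (pvP teams tied_teams) hinner]
  apply pv_foldl_congr
  intro s' j hj
  have hpj : pvP teams tied_teams j = true := List.of_mem_filter hj
  simp only [pvP] at hpi hpj
  have hand : (tied_teams.contains (pvHome teams i) && tied_teams.contains (pvHome teams j)) = true := by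
    rw [hpi, hpj]; rfl
  dsimp only [pvStepHA, pvStepHB]
  split_ifs with h1 h2 <;> rfl

-- ===== VERDICT (by name: the statement is the Claim_ definition above) =====
theorem calculate_head_to_head_stats_spec : Claim_equal_calculate_head_to_head_stats := by
  intro results_matrix teams tied_teams _dom _pre
  unfold Spec_calculate_head_to_head_stats
  rw [pvA_eq, pvB_eq, pvH_chain]
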